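-- pv_equiv track=rewrite | github.com/EndaltsevaAR/YandexTaskPy | lectures/_02_search/two_shortest_word.py | short_words
-- ===== SOURCE A (Python) =====
-- def short_words(words):
--     min_len = len(words[0])
--     for word in words:
--         if len(word) < min_len:
--             min_len = len(word)
--     answer = []
--     for word in words:
--         if len(word) == min_len:
--             answer.append(word)
--     return " ".join(answer)
-- ===== SOURCE B (Python) =====
-- def short_words(words):
--     min_len = len(words[0])
--     answer = []
--     for word in words:
--         l = len(word)
--         if l < min_len:
--             min_len = l
--             answer = [word]
--         elif l == min_len:
--             answer.append(word)
--     return " ".join(answer)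
-- ===== Notes on version B (the rewrite author's own statement) =====
-- stated objective: alternative
-- what changed: Fused A's two passes (find min length, then collect matches) into one pass that maintains the running min length together with the list of words achieving it, resetting the list whenever a shorter word appears.
import Mathlib
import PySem

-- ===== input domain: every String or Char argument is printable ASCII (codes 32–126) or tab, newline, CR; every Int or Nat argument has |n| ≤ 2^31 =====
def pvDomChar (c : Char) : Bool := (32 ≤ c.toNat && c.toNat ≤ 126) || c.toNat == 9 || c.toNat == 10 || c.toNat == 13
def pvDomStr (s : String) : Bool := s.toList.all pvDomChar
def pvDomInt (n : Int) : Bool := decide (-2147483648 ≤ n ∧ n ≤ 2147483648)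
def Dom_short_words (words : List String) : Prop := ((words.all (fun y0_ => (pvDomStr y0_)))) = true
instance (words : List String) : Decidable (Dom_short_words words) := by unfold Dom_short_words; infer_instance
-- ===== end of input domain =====

-- B fuses A's two passes into one that keeps the running min length with its matching words.
-- On the empty list both Pythons raise IndexError at words[0] (excluded by Pre_).

-- ===== PORT A =====
-- A: first pass computes min_len seeded from len(words[0]); second pass appends matches; join.
def short_words (words : List String) : String :=
  let min_len := words.foldl
    (fun min_len word => if PySem.Str.len word < min_len then PySem.Str.len word else min_len)
    (PySem.Str.len ((PySem.List.pyGet? words 0).getD ""))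
  let answer := words.foldl
    (fun answer word => if PySem.Str.len word == min_len then answer ++ [word] else answer) []
  PySem.Str.join " " answer

-- ===== PORT B =====
-- B: one pass over words with state (min_len, answer).
def short_words_alt (words : List String) : String :=
  let st := words.foldl
    (fun (st : Int × List String) word =>
      let l := PySem.Str.len word
      if l < st.1 then (l, [word])
      else if l == st.1 then (st.1, st.2 ++ [word])
      else st)
    (PySem.Str.len ((PySem.List.pyGet? words 0).getD ""), [])
  PySem.Str.join " " st.2

-- ===== PRECONDITION & SPEC =====
-- A raises IndexError at words[0] on the empty list; excluded.
def Pre_short_words (words : List String) : Prop := words ≠ []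
instance (words : List String) : Decidable (Pre_short_words words) := by unfold Pre_short_words; infer_instance
def pvWitness_short_words : List String := (["ab", "c", "de"])

def Spec_short_words (words : List String) (out : String) : Prop := out = short_words_alt words
instance (words : List String) (out : String) : Decidable (Spec_short_words words out) := by unfold Spec_short_words; infer_instance

-- ===== CLAIM (what is proved, stated in full; the proofs are below) =====
def Claim_equal_short_words : Prop := ∀ (words : List String), Dom_short_words words → Pre_short_words words → Spec_short_words words (short_words words)

-- ===== LEMMAS AND PROOFS =====

theorem pv_mfold_le {α : Type} (f : α → Int) (xs : List α) (m : Int) :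
    xs.foldl (fun a w => if f w < a then f w else a) m ≤ m := by
  induction xs generalizing m with
  | nil => simp
  | cons w t ih =>
    simp only [List.foldl_cons]
    split_ifs with h
    · exact le_trans (ih _) (le_of_lt h)
    · exact ih _

theorem pv_B_inv {α : Type} (f : α → Int) (xs : List α) (m : Int) (acc : List α) :
    xs.foldl
      (fun (st : Int × List α) word =>
        let l := f word
        if l < st.1 then (l, [word])
        else if l == st.1 then (st.1, st.2 ++ [word])
        else st)
      (m, acc)
    = (xs.foldl (fun a w => if f w < a then f w else a) m,
       (if xs.foldl (fun a w => if f w < a then f w else a) m < m then [] else acc)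
       ++ xs.filter (fun w => f w == xs.foldl (fun a w => if f w < a then f w else a) m)) := by
  induction xs generalizing m acc with
  | nil => simp
  | cons w t ih =>
    simp only [List.foldl_cons, List.filter_cons]
    by_cases h1 : f w < m
    · simp only [if_pos h1]
      rw [ih]
      have hle := pv_mfold_le f t (f w)
      set M := t.foldl (fun a w => if f w < a then f w else a) (f w) with hM
      have hMm : M < m := lt_of_le_of_lt hle h1
      by_cases h2 : M < f w
      · have hne : (f w == M) = false := by simp only [beq_eq_false_iff_ne, ne_eq]; omega
        simp [if_pos hMm, if_pos h2, hne]
      · have hEq : (f w == M) = true := by simp only [beq_iff_eq]; omega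
        simp [if_pos hMm, if_neg h2, hEq]
    · simp only [if_neg h1]
      by_cases h2 : f w = m
      · have hb : (f w == m) = true := by simp [h2]
        simp only [hb, if_true]
        rw [ih]
        set M := t.foldl (fun a w => if f w < a then f w else a) m with hM
        have hle := pv_mfold_le f t m
        by_cases h3 : M < m
        · have hne : (f w == M) = false := by simp only [beq_eq_false_iff_ne, ne_eq]; omega
          simp [if_pos h3, hne]
        · have hEq : (f w == M) = true := by
            simp only [beq_iff_eq]
            omega
          simp [if_neg h3, hEq]
      · have hb : (f w == m) = false := by simp [h2]
        simp only [hb, Bool.false_eq_true, if_false]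
        rw [ih]
        set M := t.foldl (fun a w => if f w < a then f w else a) m with hM
        have hle := pv_mfold_le f t m
        have hne : (f w == M) = false := by simp only [beq_eq_false_iff_ne, ne_eq]; omega
        simp [hne]

theorem pv_filter_fold {α : Type} (f : α → Int) (M : Int) (xs : List α) (acc : List α) :
    xs.foldl (fun answer word => if f word == M then answer ++ [word] else answer) acc
      = acc ++ xs.filter (fun w => f w == M) := by
  induction xs generalizing acc with
  | nil => simp
  | cons w t ih =>
    simp only [List.foldl_cons, List.filter_cons]
    by_cases h : (f w == M) = true
    · rw [if_pos h, ih, h]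
      simp
    · rw [if_neg h, ih, eq_false_of_ne_true h]
      simp

-- ===== VERDICT (by name: the statement is the Claim_ definition above) =====
theorem short_words_spec : Claim_equal_short_words := by
  intro words _ _
  unfold Spec_short_words short_words short_words_alt
  simp only [pv_B_inv PySem.Str.len, pv_filter_fold PySem.Str.len]
  simp
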